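-- pv_equiv track=rewrite | github.com/sagemath/sage-archive-2023-02-01 | src/sage/tests/arxiv_0812_2725.py | dcrossing
-- ===== SOURCE A (Python) =====
-- def dcrossing(m_):
--     """Return the largest k for which the given matching or set
--     partition has a k-distant crossing.
--
--     INPUT:
--        m -- a matching or set partition, as a list of 2-element tuples
--        representing the edges. You'll need to call setp_to_edges() on
--        the objects returned by SetPartitions() to put them into the
--        proper format.
--
--     OUTPUT:
--        The largest k for which the object has a k-distant crossing.
--        Matchings and set partitions with no crossings at all yield -1.
--
--     EXAMPLES:
--     The main example from the paper:
--         sage: from sage.tests.arxiv_0812_2725 import *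
--         sage: dcrossing(setp_to_edges(Set(map(Set, [[1,5],[2,4,9],[3],[6,12],[7,10,11],[8]]))))
--         3
--
--     A matching example:
--
--         sage: from sage.tests.arxiv_0812_2725 import *
--         sage: dcrossing([(4, 7), (3, 6), (2, 5), (1, 8)])
--         2
--
--     TESTS:
--     The empty matching and set partition are noncrossing:
--         sage: dcrossing([])
--         -1
--         sage: dcrossing(Set([]))
--         -1
--
--     One edge:
--         sage: dcrossing([Set((1,2))])
--         -1
--         sage: dcrossing(Set([Set((1,2))]))
--         -1
--
--     Set partition with block of size >= 3 is always at least
--     0-dcrossing: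
--         sage: dcrossing(setp_to_edges(Set([Set((1,2,3))])))
--         0
--     """
--     d = -1
--     m = list(m_)
--     while len(m) > 0:
--         e1_ = m.pop()
--         for e2_ in m:
--             e1, e2 = sorted(e1_), sorted(e2_)
--             if (e1[0] < e2[0] and e2[0] <= e1[1] and e1[1] < e2[1] and
--                 e1[1] - e2[0] > d):
--                 d =  e1[1] - e2[0]
--             if (e2[0] < e1[0] and e1[0] <= e2[1] and e2[1] < e1[1] and
--                 e2[1] - e1[0] > d):
--                 d = e2[1] - e1[0]
--     return d
-- ===== SOURCE B (Python) =====
-- import bisect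
--
--
-- def dcrossing(m_):
--     """Largest k-distant crossing via a sweep over edges sorted by left
--     endpoint, keeping the right endpoints of already-passed edges in a
--     sorted list and answering each edge with a binary-search predecessor
--     query (largest b' < b among edges with strictly smaller left end)."""
--     es = sorted((min(e), max(e)) for e in m_)
--     n = len(es)
--     seen = []   # sorted right endpoints of edges whose left end is < current a
--     best = -1
--     p = 0
--     for a, b in es:
--         while p < n and es[p][0] < a:
--             bisect.insort(seen, es[p][1])
--             p += 1
--         k = bisect.bisect_left(seen, b)
--         if k and seen[k - 1] >= a:
--             cand = seen[k - 1] - a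
--             if cand > best:
--                 best = cand
--     return best
-- ===== Notes on version B (the rewrite author's own statement) =====
-- stated objective: faster
-- what changed: Replaces A's all-pairs double loop (pop each edge, rescan and re-sort against every remaining edge) by a sweep over the edges sorted by left endpoint that keeps the right endpoints of already-passed edges in a sorted list and answers each edge with one binary-search predecessor query.
import Mathlib
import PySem

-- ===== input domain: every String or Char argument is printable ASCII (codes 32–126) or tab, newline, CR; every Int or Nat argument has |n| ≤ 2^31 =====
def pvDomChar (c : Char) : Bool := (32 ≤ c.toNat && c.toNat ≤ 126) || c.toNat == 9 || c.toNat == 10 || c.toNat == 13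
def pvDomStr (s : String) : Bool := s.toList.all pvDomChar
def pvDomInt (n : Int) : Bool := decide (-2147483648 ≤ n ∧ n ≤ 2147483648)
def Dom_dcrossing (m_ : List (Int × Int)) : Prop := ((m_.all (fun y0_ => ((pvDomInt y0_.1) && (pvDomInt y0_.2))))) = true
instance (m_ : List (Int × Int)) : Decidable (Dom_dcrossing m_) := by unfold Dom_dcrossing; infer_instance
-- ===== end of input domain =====

-- B replaces A's all-pairs double loop by a sort-and-sweep with binary-search
-- predecessor queries on the right endpoints of the edges already passed.

-- ===== PORT A =====
-- sorted(e) on a 2-element tuple: (min, max)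
def aSortPair (e : Int × Int) : Int × Int := if e.1 ≤ e.2 then e else (e.2, e.1)

-- the inner 'for e2_ in m' loop over the list after the pop
def dcrossingInner (e1_ : Int × Int) (m : List (Int × Int)) (d : Int) : Int :=
  m.foldl (fun d e2_ =>
    let e1 := aSortPair e1_
    let e2 := aSortPair e2_
    let d := if e1.1 < e2.1 ∧ e2.1 ≤ e1.2 ∧ e1.2 < e2.2 ∧ e1.2 - e2.1 > d then e1.2 - e2.1 else d
    if e2.1 < e1.1 ∧ e1.1 ≤ e2.2 ∧ e2.2 < e1.2 ∧ e2.2 - e1.1 > d then e2.2 - e1.1 else d) d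

-- the 'while len(m) > 0: e1_ = m.pop(); …' loop, run on the reversed list:
-- m.pop() takes the last element, and the inner loop then iterates the
-- remaining list in original order (rest.reverse)
def dcrossingGo : List (Int × Int) → Int → Int
  | [], d => d
  | e1_ :: rest, d => dcrossingGo rest (dcrossingInner e1_ rest.reverse d)

def dcrossing (m_ : List (Int × Int)) : Int := dcrossingGo m_.reverse (-1)

-- ===== PORT B =====
def bNorm (e : Int × Int) : Int × Int := (min e.1 e.2, max e.1 e.2)

-- bisect.insort(seen, x): insert at the bisect_right position
def bInsort (seen : List Int) (x : Int) : List Int :=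
  PySem.List.insert seen ((PySem.List.bisectRight seen x : Nat) : Int) x

-- the 'while p < n and es[p][0] < a' loop; the not-yet-inserted suffix es[p:]
-- is carried as the list 'todo' (p < n ↔ todo ≠ [])
def bAdvance (a : Int) : List (Int × Int) → List Int → List (Int × Int) × List Int
  | [], seen => ([], seen)
  | (a', b') :: t, seen =>
    if a' < a then bAdvance a t (bInsort seen b') else ((a', b') :: t, seen)

-- the 'for a, b in es' loop
def bGo : List (Int × Int) → List (Int × Int) → List Int → Int → Int
  | [], _, _, best => best
  | (a, b) :: rest, todo, seen, best =>
    let s := bAdvance a todo seen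
    let k := PySem.List.bisectLeft s.2 b
    -- seen[k-1]: index in range since k ≠ 0 and k ≤ len(seen)
    let best' := if k ≠ 0 ∧ s.2.getD (k - 1) 0 ≥ a then
                   (if s.2.getD (k - 1) 0 - a > best then s.2.getD (k - 1) 0 - a else best)
                 else best
    bGo rest s.1 s.2 best'

def dcrossing_alt (m_ : List (Int × Int)) : Int :=
  let es := PySem.List.sorted2 (m_.map bNorm) (·.1) (·.2)   -- sorted(...) on pairs: lexicographic
  bGo es es [] (-1)

-- ===== PRECONDITION & SPEC =====
def Spec_dcrossing (m_ : List (Int × Int)) (out : Int) : Prop := out = dcrossing_alt m_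
instance (m_ : List (Int × Int)) (out : Int) : Decidable (Spec_dcrossing m_ out) := by unfold Spec_dcrossing; infer_instance

-- ===== CLAIM (what is proved, stated in full; the proofs are below) =====
def Claim_equal_dcrossing : Prop := ∀ (m_ : List (Int × Int)), Dom_dcrossing m_ → Spec_dcrossing m_ (dcrossing m_)

-- ===== LEMMAS AND PROOFS =====

-- The common value both programs compute: max (default -1), over ordered pairs
-- (x, y) of normalised edges, of the crossing value x.2 - y.1 whenever
-- x.1 < y.1 ≤ x.2 < y.2.
def candO (x y : Int × Int) : Option Int :=
  if x.1 < y.1 ∧ y.1 ≤ x.2 ∧ x.2 < y.2 then some (x.2 - y.1) else none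

def vals (es : List (Int × Int)) : List Int :=
  es.flatMap (fun y => es.filterMap (fun x => candO x y))

def pairlist (e1 e2 : Int × Int) : List Int :=
  (candO (bNorm e1) (bNorm e2)).toList ++ (candO (bNorm e2) (bNorm e1)).toList

def pairsR : List (Int × Int) → List Int
  | [] => []
  | e :: rest => rest.reverse.flatMap (pairlist e) ++ pairsR rest

-- ---- generic list facts ----
theorem flatMap_append_perm {α β : Type} (l : List α) (f g : α → List β) :
    (l.flatMap (fun x => f x ++ g x)).Perm (l.flatMap f ++ l.flatMap g) := by
  induction l with
  | nil => simp
  | cons a l ih =>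
    simp only [List.flatMap_cons]
    refine (List.Perm.append_left _ ih).trans ?_
    simp only [List.append_assoc]
    exact List.Perm.append_left (f a) (List.perm_append_comm_assoc _ _ _)

theorem filterMap_cons_toList {α β : Type} (f : α → Option β) (a : α) (l : List α) :
    List.filterMap f (a :: l) = (f a).toList ++ l.filterMap f := by
  cases h : f a <;> simp [h]

theorem foldl_max_eq_of_mem (L : List Int) (M best : Int)
    (hmem : M ∈ L) (hub : ∀ v ∈ L, v ≤ M) : L.foldl max best = max best M := by
  have h1 := PySem.List.le_foldl_max L best
  have h2 := PySem.List.foldl_max_mem L best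
  apply le_antisymm
  · rcases h2 with h | h
    · rw [h]; exact le_max_left _ _
    · exact le_trans (hub _ h) (le_max_right _ _)
  · exact max_le h1.1 (h1.2 _ hmem)


-- ---- A equals the common value ----

theorem aSortPair_eq_bNorm (e : Int × Int) : aSortPair e = bNorm e := by
  cases e with
  | mk a b =>
    simp only [aSortPair, bNorm, min_def, max_def]
    split_ifs
    all_goals simp_all

theorem inner_eq (e1_ : Int × Int) (l : List (Int × Int)) (d : Int) :
    dcrossingInner e1_ l d = (l.flatMap (pairlist e1_)).foldl max d := by
  induction l generalizing d with
  | nil => simp [dcrossingInner]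
  | cons e2_ l ih =>
    simp only [dcrossingInner, List.foldl_cons, List.flatMap_cons, List.foldl_append] at *
    rw [ih]
    congr 1
    simp only [aSortPair_eq_bNorm, pairlist, candO]
    split_ifs <;> simp [max_def]
    all_goals omega

theorem go_eq (l : List (Int × Int)) (d : Int) :
    dcrossingGo l d = (pairsR l).foldl max d := by
  induction l generalizing d with
  | nil => simp [dcrossingGo, pairsR]
  | cons e rest ih => simp [dcrossingGo, pairsR, ih, inner_eq, List.foldl_append]

theorem pairsR_perm (l : List (Int × Int)) : (pairsR l).Perm (vals (l.map bNorm)) := by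
  induction l with
  | nil => simp [pairsR, vals]
  | cons e rest ih =>
    have hX : rest.flatMap (fun x => (candO (bNorm e) (bNorm x)).toList)
        = (rest.map bNorm).flatMap (fun y => (candO (bNorm e) y).toList) := by
      simp [List.flatMap_map]
    have hY : rest.flatMap (fun x => (candO (bNorm x) (bNorm e)).toList)
        = (rest.map bNorm).filterMap (fun x => candO x (bNorm e)) := by
      rw [List.filterMap_map, List.filterMap_eq_flatMap_toList]; rfl
    have lhs1 : (pairsR (e :: rest)).Perm
        ((rest.flatMap (fun x => (candO (bNorm e) (bNorm x)).toList)
          ++ rest.flatMap (fun x => (candO (bNorm x) (bNorm e)).toList)) ++ pairsR rest) := by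
      show (rest.reverse.flatMap (pairlist e) ++ pairsR rest).Perm _
      refine List.Perm.append ?_ (List.Perm.refl _)
      refine (List.Perm.flatMap (List.reverse_perm rest) (fun a _ => List.Perm.refl _)).trans ?_
      exact flatMap_append_perm rest _ _
    have rhs1 : vals ((e :: rest).map bNorm)
        = (rest.map bNorm).filterMap (fun x => candO x (bNorm e))
          ++ (rest.map bNorm).flatMap (fun y => (candO (bNorm e) y).toList
              ++ (rest.map bNorm).filterMap (fun x => candO x y)) := by
      have hne : candO (bNorm e) (bNorm e) = none := by simp [candO]
      simp only [vals, List.map_cons, List.flatMap_cons, filterMap_cons_toList, hne,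
        Option.toList_none, List.nil_append]
    have rhs2 : ((rest.map bNorm).flatMap (fun y => (candO (bNorm e) y).toList
              ++ (rest.map bNorm).filterMap (fun x => candO x y))).Perm
        ((rest.map bNorm).flatMap (fun y => (candO (bNorm e) y).toList) ++ vals (rest.map bNorm)) :=
      flatMap_append_perm _ _ _
    refine lhs1.trans ?_
    rw [hX, hY, rhs1]
    refine List.Perm.trans ?_ (List.Perm.append_left _ rhs2.symm)
    refine (List.Perm.append_left _ ih).trans ?_
    simp only [List.append_assoc]
    exact List.perm_append_comm_assoc _ _ _

theorem vals_perm {l l' : List (Int × Int)} (h : l.Perm l') : (vals l).Perm (vals l') :=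
  List.Perm.flatMap h (fun _ _ => List.Perm.filterMap _ h)

theorem dcrossing_eq_vals (m_ : List (Int × Int)) :
    dcrossing m_ = (vals (m_.map bNorm)).foldl max (-1) := by
  rw [dcrossing, go_eq]
  exact List.Perm.foldl_eq
    ((pairsR_perm m_.reverse).trans (vals_perm (List.Perm.map bNorm (List.reverse_perm m_)))) (-1)


-- ---- B-side: insort, advance, query, sweep ----

theorem bInsort_perm (seen : List Int) (x : Int) (hs : seen.Pairwise (· ≤ ·)) :
    (bInsort seen x).Perm (x :: seen) := by
  have spec := PySem.List.bisectRight_spec seen x hs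
  rw [bInsort, PySem.List.insert_natCast _ _ _ spec.1]
  exact List.perm_middle.trans (by rw [List.take_append_drop])

theorem bInsort_sorted (seen : List Int) (x : Int) (hs : seen.Pairwise (· ≤ ·)) :
    (bInsort seen x).Pairwise (· ≤ ·) := by
  have spec := PySem.List.bisectRight_spec seen x hs
  set k := PySem.List.bisectRight seen x with hk
  rw [bInsort, ← hk, PySem.List.insert_natCast _ _ _ spec.1]
  have hpg := List.pairwise_iff_getElem.mp hs
  rw [List.pairwise_append]
  refine ⟨hs.sublist (List.take_sublist _ _), ?_, ?_⟩
  · rw [List.pairwise_cons]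
    refine ⟨?_, hs.sublist (List.drop_sublist _ _)⟩
    intro v hv
    rcases List.mem_drop_iff_getElem.mp hv with ⟨j, hj, rfl⟩
    exact le_of_lt (spec.2.2 (k + j) (by omega) (by omega))
  · intro u hu v hv
    rcases List.mem_take_iff_getElem.mp hu with ⟨i, hi, rfl⟩
    have hiu : i < k := by omega
    rcases List.mem_cons.mp hv with rfl | hv
    · exact spec.2.1 i (by omega) hiu
    · rcases List.mem_drop_iff_getElem.mp hv with ⟨j, hj, rfl⟩
      exact le_of_lt (lt_of_le_of_lt (spec.2.1 i (by omega) hiu) (spec.2.2 (k + j) (by omega) (by omega)))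

theorem bAdvance_spec (a : Int) : ∀ (todo : List (Int × Int)) (seen : List Int),
    seen.Pairwise (· ≤ ·) →
    ∃ popped,
      todo = popped ++ (bAdvance a todo seen).1 ∧
      (∀ x ∈ popped, x.1 < a) ∧
      (∀ hd tl, (bAdvance a todo seen).1 = hd :: tl → ¬ hd.1 < a) ∧
      (bAdvance a todo seen).2.Perm (seen ++ popped.map (·.2)) ∧
      (bAdvance a todo seen).2.Pairwise (· ≤ ·) := by
  intro todo
  induction todo with
  | nil =>
    intro seen hs
    exact ⟨[], by simp [bAdvance], by simp, by simp [bAdvance], by simp [bAdvance], by simpa [bAdvance] using hs⟩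
  | cons e t ih =>
    rcases e with ⟨a', b'⟩
    intro seen hs
    by_cases h : a' < a
    · have hs' := bInsort_sorted seen b' hs
      rcases ih (bInsort seen b') hs' with ⟨p, hp1, hp2, hp3, hp4, hp5⟩
      have hadv : bAdvance a ((a', b') :: t) seen = bAdvance a t (bInsort seen b') := by
        simp [bAdvance, h]
      refine ⟨(a', b') :: p, ?_, ?_, ?_, ?_, ?_⟩
      · rw [hadv]; simpa using hp1
      · intro x hx; rcases List.mem_cons.mp hx with rfl | hx
        · exact h
        · exact hp2 x hx
      · rw [hadv]; exact hp3
      · rw [hadv]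
        refine hp4.trans ?_
        refine (List.Perm.append (bInsort_perm seen b' hs) (List.Perm.refl _)).trans ?_
        simpa using List.perm_middle.symm
      · rw [hadv]; exact hp5
    · have hadv : bAdvance a ((a', b') :: t) seen = ((a', b') :: t, seen) := by
        simp [bAdvance, h]
      refine ⟨[], by simp [hadv], by simp, ?_, by simp [hadv], by simpa [hadv] using hs⟩
      intro hd tl heq
      rw [hadv] at heq
      cases heq
      exact h

theorem query_step (seen : List Int) (hs : seen.Pairwise (· ≤ ·)) (a b best : Int) :
    (seen.filterMap (fun c => if a ≤ c ∧ c < b then some (c - a) else none)).foldl max best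
    = (if PySem.List.bisectLeft seen b ≠ 0 ∧ seen.getD (PySem.List.bisectLeft seen b - 1) 0 ≥ a
       then (if seen.getD (PySem.List.bisectLeft seen b - 1) 0 - a > best
             then seen.getD (PySem.List.bisectLeft seen b - 1) 0 - a else best)
       else best) := by
  have spec := PySem.List.bisectLeft_spec seen b hs
  have hpg := List.pairwise_iff_getElem.mp hs
  set k := PySem.List.bisectLeft seen b with hk
  rcases Nat.eq_zero_or_pos k with hk0 | hkpos
  · have hnil : seen.filterMap (fun c => if a ≤ c ∧ c < b then some (c - a) else none) = [] := by
      rw [List.filterMap_eq_nil_iff]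
      intro c hc
      rcases List.mem_iff_getElem.mp hc with ⟨j, hj, rfl⟩
      have : b ≤ seen[j] := spec.2.2 j hj (by omega)
      simp only [ite_eq_right_iff]
      intro hcond; omega
    rw [hnil]
    simp [hk0]
  · have hklen : k - 1 < seen.length := by omega
    have hgd : seen.getD (k - 1) 0 = seen[k - 1] := List.getD_eq_getElem _ _ hklen
    have hsb : seen[k - 1] < b := spec.2.1 (k - 1) hklen (by omega)
    by_cases ha : a ≤ seen[k - 1]
    · have hmem : seen[k - 1] - a ∈
          seen.filterMap (fun c => if a ≤ c ∧ c < b then some (c - a) else none) := by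
        rw [List.mem_filterMap]
        exact ⟨seen[k - 1], List.getElem_mem _, by rw [if_pos ⟨ha, hsb⟩]⟩
      have hub : ∀ v ∈ seen.filterMap (fun c => if a ≤ c ∧ c < b then some (c - a) else none),
          v ≤ seen[k - 1] - a := by
        intro v hv
        rcases List.mem_filterMap.mp hv with ⟨c, hc, hfc⟩
        rcases List.mem_iff_getElem.mp hc with ⟨j, hj, rfl⟩
        by_cases hcond : a ≤ seen[j] ∧ seen[j] < b
        · rw [if_pos hcond] at hfc
          obtain rfl : v = seen[j] - a := (Option.some.inj hfc).symm
          have hjk : j < k := by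
            by_contra hge
            have := spec.2.2 j hj (by omega)
            omega
          have hle : seen[j] ≤ seen[k - 1] := by
            rcases Nat.lt_or_ge j (k - 1) with hlt | hge
            · exact hpg j (k - 1) hj hklen hlt
            · have : j = k - 1 := by omega
              subst this; exact le_refl _
          omega
        · rw [if_neg hcond] at hfc; cases hfc
      rw [foldl_max_eq_of_mem _ _ _ hmem hub]
      rw [if_pos ⟨by omega, by omega⟩]
      rw [hgd]
      by_cases hgt : seen[k - 1] - a > best
      · rw [if_pos hgt, max_eq_right (by omega)]
      · rw [if_neg hgt, max_eq_left (by omega)]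
    · have hnil : seen.filterMap (fun c => if a ≤ c ∧ c < b then some (c - a) else none) = [] := by
        rw [List.filterMap_eq_nil_iff]
        intro c hc
        rcases List.mem_iff_getElem.mp hc with ⟨j, hj, rfl⟩
        simp only [ite_eq_right_iff]
        intro hcond
        exfalso
        have hjk : j < k := by
          by_contra hge
          have := spec.2.2 j hj (by omega)
          omega
        have hle : seen[j] ≤ seen[k - 1] := by
          rcases Nat.lt_or_ge j (k - 1) with hlt | hge
          · exact hpg j (k - 1) hj hklen hlt
          · have : j = k - 1 := by omega
            subst this; exact le_refl _
        omega
      rw [hnil, if_neg (by rw [hgd]; omega)]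
      simp

theorem insertBy_pairwise {α : Type} (before : α → α → Bool) (R : α → α → Prop)
    (htrans : ∀ a b c, R a b → R b c → R a c)
    (ht : ∀ a b, before a b = true → R a b) (hf : ∀ a b, before a b = false → R b a)
    (x : α) : ∀ l, l.Pairwise R → (PySem.List.insertBy before x l).Pairwise R := by
  intro l
  induction l with
  | nil => intro _; simp [PySem.List.insertBy]
  | cons y ys ih =>
    intro hp
    rcases List.pairwise_cons.mp hp with ⟨hy, hys⟩
    by_cases hb : before x y
    · rw [show PySem.List.insertBy before x (y :: ys) = x :: y :: ys from by
        simp [PySem.List.insertBy, hb]]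
      rw [List.pairwise_cons]
      refine ⟨?_, hp⟩
      intro z hz
      rcases List.mem_cons.mp hz with rfl | hz
      · exact ht _ _ hb
      · exact htrans _ _ _ (ht _ _ hb) (hy z hz)
    · rw [show PySem.List.insertBy before x (y :: ys) = y :: PySem.List.insertBy before x ys from by
        simp [PySem.List.insertBy, hb]]
      rw [List.pairwise_cons]
      refine ⟨?_, ih hys⟩
      intro z hz
      rcases (PySem.List.mem_insertBy before x z ys).mp hz with rfl | hz
      · exact hf _ _ (by simpa using hb)
      · exact hy z hz

theorem foldl_insertBy_pairwise {α : Type} (before : α → α → Bool) (R : α → α → Prop)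
    (htrans : ∀ a b c, R a b → R b c → R a c)
    (ht : ∀ a b, before a b = true → R a b) (hf : ∀ a b, before a b = false → R b a) :
    ∀ (xs acc : List α), acc.Pairwise R →
      (xs.foldl (fun acc x => PySem.List.insertBy before x acc) acc).Pairwise R := by
  intro xs
  induction xs with
  | nil => intro acc h; simpa using h
  | cons x xs ih =>
    intro acc h
    exact ih _ (insertBy_pairwise before R htrans ht hf x acc h)

theorem sorted2_pairwise_fst (xs : List (Int × Int)) :
    (PySem.List.sorted2 xs (·.1) (·.2) false).Pairwise (fun x y => x.1 ≤ y.1) := by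
  have hdef : PySem.List.sorted2 xs (·.1) (·.2) false
      = xs.foldl (fun acc x => PySem.List.insertBy
          (fun a b => decide (a.1 < b.1) || (!decide (b.1 < a.1) && decide (a.2 < b.2))) x acc) [] := rfl
  rw [hdef]
  refine foldl_insertBy_pairwise _ (fun (x y : Int × Int) => x.1 ≤ y.1) (fun a b c h1 h2 => le_trans h1 h2) ?_ ?_ xs [] (by simp)
  · intro a b h; simp at h; omega
  · intro a b h; simp at h; omega

theorem bGo_eq : ∀ (cur ins mid : List (Int × Int)) (seen : List Int) (best : Int),
    (ins ++ mid ++ cur).Pairwise (fun x y => x.1 ≤ y.1) →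
    seen.Perm (ins.map (·.2)) →
    seen.Pairwise (· ≤ ·) →
    (∀ x ∈ ins, ∀ y ∈ cur, x.1 < y.1) →
    bGo cur (mid ++ cur) seen best
      = (cur.flatMap (fun y => (ins ++ mid ++ cur).filterMap (fun x => candO x y))).foldl max best := by
  intro cur
  induction cur with
  | nil => intro ins mid seen best _ _ _ _; simp [bGo]
  | cons yb rest ih =>
    rcases yb with ⟨a, b⟩
    intro ins mid seen best hpw hsp hss hins
    rcases bAdvance_spec a (mid ++ (a, b) :: rest) seen hss with ⟨popped, hp1, hp2, hp3, hp4, hp5⟩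
    set s := bAdvance a (mid ++ (a, b) :: rest) seen with hsdef
    -- popped is a prefix of mid
    obtain ⟨mid', hm, hs1⟩ : ∃ mid', mid = popped ++ mid' ∧ s.1 = mid' ++ (a, b) :: rest := by
      rcases List.append_eq_append_iff.mp hp1 with ⟨as, has1, has2⟩ | ⟨bs, hbs1, hbs2⟩
      · cases as with
        | nil => exact ⟨[], by simpa using has1.symm, by simpa using has2.symm⟩
        | cons c cs =>
          exfalso
          rw [List.cons_append] at has2
          cases (List.cons.inj has2).1
          have hcmem : (a, b) ∈ popped := by
            rw [has1]; exact List.mem_append_right _ (List.mem_cons_self)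
          exact absurd (hp2 _ hcmem) (lt_irrefl a)
      · exact ⟨bs, hbs1, hbs2⟩
    have hfull : ins ++ mid ++ (a, b) :: rest = (ins ++ popped) ++ ((mid' ++ [(a, b)]) ++ rest) := by
      rw [hm]; simp
    have hfull2 : ins ++ mid ++ (a, b) :: rest = (ins ++ popped) ++ s.1 := by
      rw [hm, hs1]; simp
    have hinsp : ∀ x ∈ ins ++ popped, x.1 < a := by
      intro x hx
      rcases List.mem_append.mp hx with hx | hx
      · exact hins x hx (a, b) List.mem_cons_self
      · exact hp2 x hx
    have hp4' : s.2.Perm ((ins ++ popped).map (·.2)) := by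
      refine hp4.trans ?_
      rw [List.map_append]
      exact List.Perm.append hsp (List.Perm.refl _)
    have hpwtail : s.1.Pairwise (fun x y => x.1 ≤ y.1) := by
      refine hpw.sublist ?_
      rw [hfull2]; exact List.sublist_append_right _ _
    have htail : ∀ x ∈ s.1, a ≤ x.1 := by
      cases hmid'' : s.1 with
      | nil => intro x hx; cases hx
      | cons hd tl =>
        have hhd : ¬ hd.1 < a := hp3 hd tl hmid''
        intro x hx
        rw [hmid''] at hpwtail
        rcases List.mem_cons.mp hx with rfl | hx
        · omega
        · have := (List.pairwise_cons.mp hpwtail).1 x hx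
          omega
    have hL : (List.filterMap (fun x => candO x (a, b)) (ins ++ mid ++ (a, b) :: rest))
        = List.filterMap (fun c => if a ≤ c ∧ c < b then some (c - a) else none)
            ((ins ++ popped).map (·.2)) := by
      rw [hfull2, List.filterMap_append]
      have h2 : List.filterMap (fun x => candO x (a, b)) s.1 = [] := by
        rw [List.filterMap_eq_nil_iff]
        intro x hx
        have hax := htail x hx
        simp only [candO]
        exact if_neg (fun hc => absurd hc.1 (not_lt.mpr hax))
      rw [h2, List.append_nil, List.filterMap_map]
      apply List.filterMap_congr
      intro x hx
      have hxa := hinsp x hx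
      simp only [candO, Function.comp]
      by_cases hc : a ≤ x.2 ∧ x.2 < b
      · rw [if_pos ⟨hxa, hc.1, hc.2⟩, if_pos hc]
      · rw [if_neg (fun hh => hc ⟨hh.2.1, hh.2.2⟩), if_neg hc]
    have hstep : (List.filterMap (fun x => candO x (a, b)) (ins ++ mid ++ (a, b) :: rest)).foldl max best
        = (if PySem.List.bisectLeft s.2 b ≠ 0 ∧ s.2.getD (PySem.List.bisectLeft s.2 b - 1) 0 ≥ a
           then (if s.2.getD (PySem.List.bisectLeft s.2 b - 1) 0 - a > best
                 then s.2.getD (PySem.List.bisectLeft s.2 b - 1) 0 - a else best)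
           else best) := by
      rw [hL]
      rw [List.Perm.foldl_eq (List.Perm.filterMap _ hp4'.symm) best]
      exact query_step s.2 hp5 a b best
    have hins' : ∀ x ∈ ins ++ popped, ∀ y ∈ rest, x.1 < y.1 := by
      intro x hx y hy
      have hxa := hinsp x hx
      have hay : a ≤ y.1 := by
        have hsub : ((a, b) :: rest).Sublist (ins ++ mid ++ (a, b) :: rest) :=
          List.sublist_append_right _ _
        have := (List.pairwise_cons.mp (hpw.sublist hsub)).1 y hy
        simpa using this
      omega
    have hpw' : ((ins ++ popped) ++ ((mid' ++ [(a, b)]) ++ rest)).Pairwise (fun x y => x.1 ≤ y.1) := by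
      rw [← hfull]; exact hpw
    have hs1' : s.1 = (mid' ++ [(a, b)]) ++ rest := by rw [hs1]; simp
    have hrec := ih (ins ++ popped) (mid' ++ [(a, b)]) s.2 (if PySem.List.bisectLeft s.2 b ≠ 0 ∧ s.2.getD (PySem.List.bisectLeft s.2 b - 1) 0 ≥ a
           then (if s.2.getD (PySem.List.bisectLeft s.2 b - 1) 0 - a > best
                 then s.2.getD (PySem.List.bisectLeft s.2 b - 1) 0 - a else best)
           else best) (by simpa [List.append_assoc] using hpw') hp4' hp5 hins'
    calc bGo ((a, b) :: rest) (mid ++ (a, b) :: rest) seen best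
        = bGo rest s.1 s.2 (if PySem.List.bisectLeft s.2 b ≠ 0 ∧ s.2.getD (PySem.List.bisectLeft s.2 b - 1) 0 ≥ a
           then (if s.2.getD (PySem.List.bisectLeft s.2 b - 1) 0 - a > best
                 then s.2.getD (PySem.List.bisectLeft s.2 b - 1) 0 - a else best)
           else best) := by rw [bGo]
      _ = (rest.flatMap (fun y => ((ins ++ popped) ++ (mid' ++ [(a, b)]) ++ rest).filterMap
            (fun x => candO x y))).foldl max _ := by rw [hs1']; exact hrec
      _ = (((a, b) :: rest).flatMap (fun y => (ins ++ mid ++ (a, b) :: rest).filterMap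
            (fun x => candO x y))).foldl max best := by
          rw [List.flatMap_cons, List.foldl_append, hstep]
          rw [hfull]
          simp [List.append_assoc]

theorem dcrossing_alt_eq_vals (m_ : List (Int × Int)) :
    dcrossing_alt m_ = (vals (m_.map bNorm)).foldl max (-1) := by
  have hdef : dcrossing_alt m_
      = bGo (PySem.List.sorted2 (m_.map bNorm) (·.1) (·.2))
            (PySem.List.sorted2 (m_.map bNorm) (·.1) (·.2)) [] (-1) := rfl
  have h := bGo_eq (PySem.List.sorted2 (m_.map bNorm) (·.1) (·.2)) [] [] [] (-1)
    (by simpa using sorted2_pairwise_fst (m_.map bNorm)) (by simp) (by simp) (by simp)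
  simp only [List.nil_append] at h
  rw [hdef, h]
  exact List.Perm.foldl_eq (vals_perm (PySem.List.sorted2_perm (m_.map bNorm) _ _ false)) (-1)

-- ===== VERDICT (by name: the statement is the Claim_ definition above) =====
theorem dcrossing_spec : Claim_equal_dcrossing := by
  intro m_ _
  unfold Spec_dcrossing
  rw [dcrossing_eq_vals, dcrossing_alt_eq_vals]
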